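-- pv_equiv track=rewrite | github.com/WSG23/optimal_build | backend/app/services/geocoding.py | _get_district_from_postal
-- ===== SOURCE A (Python) =====
-- from typing import Any, Dict, Optional, Tuple
--
-- def _get_district_from_postal(postal_code: str) -> Optional[str]:
--     """Map Singapore postal code to district."""
--     if not postal_code or len(postal_code) < 2:
--         return None
--
--     prefix = int(postal_code[:2])
--
--     # Singapore postal code to district mapping
--     district_map = {
--         (1, 6): "D01 - Raffles Place, Marina, Cecil",
--         (7, 8): "D02 - Chinatown, Tanjong Pagar",
--         (14, 16): "D03 - Alexandra, Tiong Bahru, Queenstown",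
--         (9, 10): "D04 - Mount Faber, Telok Blangah, Harbourfront",
--         (11, 13): "D05 - Buona Vista, West Coast, Clementi",
--         (17, 17): "D06 - City Hall, High Street, Beach Road",
--         (18, 19): "D07 - Bugis, Rochor, Bencoolen",
--         (20, 21): "D08 - Farrer Park, Little India",
--         (22, 23): "D09 - Orchard Road, River Valley",
--         (24, 27): "D10 - Tanglin, Holland, Bukit Timah",
--         (28, 30): "D11 - Newton, Novena",
--         (31, 33): "D12 - Toa Payoh, Serangoon, Balestier",
--         (34, 37): "D13 - Macpherson, Potong Pasir",
--         (38, 41): "D14 - Eunos, Kembangan, Paya Lebar",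
--         (42, 45): "D15 - Marine Parade, Siglap, Katong",
--         (46, 48): "D16 - Upper East Coast, Bedok",
--         (49, 50): "D17 - Changi, Loyang",
--         (51, 52): "D18 - Simei, Tampines, Pasir Ris",
--         (53, 55): "D19 - Punggol, Sengkang, Serangoon",
--         (56, 57): "D20 - Bishan, Ang Mo Kio",
--         (58, 59): "D21 - Clementi Park, Upper Bukit Timah",
--         (60, 64): "D22 - Boon Lay, Jurong, Tuas",
--         (65, 68): "D23 - Choa Chu Kang, Bukit Batok",
--         (69, 71): "D24 - Kranji, Lim Chu Kang",
--         (72, 73): "D25 - Woodlands, Admiralty",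
--         (75, 76): "D26 - Mandai, Upper Thomson",
--         (77, 78): "D27 - Sembawang, Yishun",
--         (79, 80): "D28 - Seletar, Yio Chu Kang",
--     }
--
--     for postal_range, district in district_map.items():
--         if postal_range[0] <= prefix <= postal_range[1]:
--             return district
--
--     return None
-- ===== SOURCE B (Python) =====
-- # Binary search over sorted upper bounds (parallel name list) instead of a linear
-- # scan over a range-keyed dict; prefix 74 is the real gap in the district table.
-- _UPPER = [6, 8, 10, 13, 16, 17, 19, 21, 23, 27, 30, 33, 37, 41, 45, 48, 50, 52,
--           55, 57, 59, 64, 68, 71, 73, 76, 78, 80]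
-- _NAMES = [
--     "D01 - Raffles Place, Marina, Cecil",
--     "D02 - Chinatown, Tanjong Pagar",
--     "D04 - Mount Faber, Telok Blangah, Harbourfront",
--     "D05 - Buona Vista, West Coast, Clementi",
--     "D03 - Alexandra, Tiong Bahru, Queenstown",
--     "D06 - City Hall, High Street, Beach Road",
--     "D07 - Bugis, Rochor, Bencoolen",
--     "D08 - Farrer Park, Little India",
--     "D09 - Orchard Road, River Valley",
--     "D10 - Tanglin, Holland, Bukit Timah",
--     "D11 - Newton, Novena",
--     "D12 - Toa Payoh, Serangoon, Balestier",
--     "D13 - Macpherson, Potong Pasir",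
--     "D14 - Eunos, Kembangan, Paya Lebar",
--     "D15 - Marine Parade, Siglap, Katong",
--     "D16 - Upper East Coast, Bedok",
--     "D17 - Changi, Loyang",
--     "D18 - Simei, Tampines, Pasir Ris",
--     "D19 - Punggol, Sengkang, Serangoon",
--     "D20 - Bishan, Ang Mo Kio",
--     "D21 - Clementi Park, Upper Bukit Timah",
--     "D22 - Boon Lay, Jurong, Tuas",
--     "D23 - Choa Chu Kang, Bukit Batok",
--     "D24 - Kranji, Lim Chu Kang",
--     "D25 - Woodlands, Admiralty",
--     "D26 - Mandai, Upper Thomson",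
--     "D27 - Sembawang, Yishun",
--     "D28 - Seletar, Yio Chu Kang",
-- ]
--
--
-- def _get_district_from_postal(postal_code: str):
--     """Map Singapore postal code to district."""
--     if not postal_code or len(postal_code) < 2:
--         return None
--     p = int(postal_code[:2])
--     if p < 1 or p > 80 or p == 74:
--         return None
--     lo, hi = 0, 27
--     while lo < hi:  # find the first upper bound >= p
--         mid = (lo + hi) // 2
--         if _UPPER[mid] < p:
--             lo = mid + 1
--         else:
--             hi = mid
--     return _NAMES[lo]
-- ===== Notes on version B (the rewrite author's own statement) =====
-- stated objective: alternative
-- what changed: A's per-call linear scan over a dict of (lo, hi) ranges is replaced by a binary search over the sorted list of range upper bounds with a parallel name list (the gap at prefix 74 handled by an explicit bounds/gap guard).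
import Mathlib
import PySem

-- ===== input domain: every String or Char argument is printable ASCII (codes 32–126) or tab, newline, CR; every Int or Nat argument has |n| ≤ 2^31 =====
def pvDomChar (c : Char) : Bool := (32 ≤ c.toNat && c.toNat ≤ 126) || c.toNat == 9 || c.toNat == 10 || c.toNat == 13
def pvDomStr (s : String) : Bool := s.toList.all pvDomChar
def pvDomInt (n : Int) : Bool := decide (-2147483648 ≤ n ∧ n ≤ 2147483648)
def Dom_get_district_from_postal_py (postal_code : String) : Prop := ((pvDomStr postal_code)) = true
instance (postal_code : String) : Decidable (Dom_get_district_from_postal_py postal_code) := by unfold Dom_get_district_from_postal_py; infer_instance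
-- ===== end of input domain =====

-- B replaces A's linear scan over a (lo, hi)-range dict with a binary search over the
-- sorted list of range upper bounds (parallel name list); same return value everywhere,
-- both raise ValueError on an unparseable 2-char prefix — excluded by Pre_.

-- ===== PORT A =====
-- the dict literal of A, as an insertion-ordered association list of ((lo, hi), district)
def districtRangesA : List ((Int × Int) × String) := [
  ((1, 6), "D01 - Raffles Place, Marina, Cecil"),
  ((7, 8), "D02 - Chinatown, Tanjong Pagar"),
  ((14, 16), "D03 - Alexandra, Tiong Bahru, Queenstown"),
  ((9, 10), "D04 - Mount Faber, Telok Blangah, Harbourfront"),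
  ((11, 13), "D05 - Buona Vista, West Coast, Clementi"),
  ((17, 17), "D06 - City Hall, High Street, Beach Road"),
  ((18, 19), "D07 - Bugis, Rochor, Bencoolen"),
  ((20, 21), "D08 - Farrer Park, Little India"),
  ((22, 23), "D09 - Orchard Road, River Valley"),
  ((24, 27), "D10 - Tanglin, Holland, Bukit Timah"),
  ((28, 30), "D11 - Newton, Novena"),
  ((31, 33), "D12 - Toa Payoh, Serangoon, Balestier"),
  ((34, 37), "D13 - Macpherson, Potong Pasir"),
  ((38, 41), "D14 - Eunos, Kembangan, Paya Lebar"),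
  ((42, 45), "D15 - Marine Parade, Siglap, Katong"),
  ((46, 48), "D16 - Upper East Coast, Bedok"),
  ((49, 50), "D17 - Changi, Loyang"),
  ((51, 52), "D18 - Simei, Tampines, Pasir Ris"),
  ((53, 55), "D19 - Punggol, Sengkang, Serangoon"),
  ((56, 57), "D20 - Bishan, Ang Mo Kio"),
  ((58, 59), "D21 - Clementi Park, Upper Bukit Timah"),
  ((60, 64), "D22 - Boon Lay, Jurong, Tuas"),
  ((65, 68), "D23 - Choa Chu Kang, Bukit Batok"),
  ((69, 71), "D24 - Kranji, Lim Chu Kang"),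
  ((72, 73), "D25 - Woodlands, Admiralty"),
  ((75, 76), "D26 - Mandai, Upper Thomson"),
  ((77, 78), "D27 - Sembawang, Yishun"),
  ((79, 80), "D28 - Seletar, Yio Chu Kang")]

def get_district_from_postal_py (postal_code : String) : Option String :=
  if PySem.Str.len postal_code = 0 ∨ PySem.Str.len postal_code < 2 then none
  else
    match PySem.Int.ofChars? (PySem.List.slice postal_code.toList none (some 2)) with
    | none => none  -- int() raises ValueError; excluded by Pre_
    | some prefix_ =>
      -- 'for postal_range, district in district_map.items(): if lo <= prefix <= hi: return district'
      ((districtRangesA.find? (fun r => decide (r.1.1 ≤ prefix_ ∧ prefix_ ≤ r.1.2))).map (·.2))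

-- ===== PORT B =====
-- Source B's _UPPER: the range upper bounds, sorted ascending
def upperB : List Int := [6, 8, 10, 13, 16, 17, 19, 21, 23, 27, 30, 33, 37, 41, 45, 48,
  50, 52, 55, 57, 59, 64, 68, 71, 73, 76, 78, 80]

-- Source B's _NAMES: district names parallel to upperB (order of the sorted ranges)
def namesB : List String := [
  "D01 - Raffles Place, Marina, Cecil",
  "D02 - Chinatown, Tanjong Pagar",
  "D04 - Mount Faber, Telok Blangah, Harbourfront",
  "D05 - Buona Vista, West Coast, Clementi",
  "D03 - Alexandra, Tiong Bahru, Queenstown",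
  "D06 - City Hall, High Street, Beach Road",
  "D07 - Bugis, Rochor, Bencoolen",
  "D08 - Farrer Park, Little India",
  "D09 - Orchard Road, River Valley",
  "D10 - Tanglin, Holland, Bukit Timah",
  "D11 - Newton, Novena",
  "D12 - Toa Payoh, Serangoon, Balestier",
  "D13 - Macpherson, Potong Pasir",
  "D14 - Eunos, Kembangan, Paya Lebar",
  "D15 - Marine Parade, Siglap, Katong",
  "D16 - Upper East Coast, Bedok",
  "D17 - Changi, Loyang",
  "D18 - Simei, Tampines, Pasir Ris",
  "D19 - Punggol, Sengkang, Serangoon",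
  "D20 - Bishan, Ang Mo Kio",
  "D21 - Clementi Park, Upper Bukit Timah",
  "D22 - Boon Lay, Jurong, Tuas",
  "D23 - Choa Chu Kang, Bukit Batok",
  "D24 - Kranji, Lim Chu Kang",
  "D25 - Woodlands, Admiralty",
  "D26 - Mandai, Upper Thomson",
  "D27 - Sembawang, Yishun",
  "D28 - Seletar, Yio Chu Kang"]

-- the 'while lo < hi' loop of Source B: first index whose upper bound is >= p
-- (fuel only makes the recursion structural; 28 steps more than cover the halving of [0, 27];
--  none = IndexError on _UPPER[mid] or fuel exhaustion, both unreachable from the entry's call)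
def bsearchB : Nat → Int → Int → Int → Option Int
  | 0, _, _, _ => none
  | fuel + 1, p, lo, hi =>
    if lo < hi then
      let mid := PySem.Int.floordiv (lo + hi) 2
      match PySem.List.pyGet? upperB mid with
      | none => none
      | some u => if u < p then bsearchB fuel p (mid + 1) hi else bsearchB fuel p lo mid
    else some lo

def get_district_from_postal_py_alt (postal_code : String) : Option String :=
  if PySem.Str.len postal_code = 0 ∨ PySem.Str.len postal_code < 2 then none
  else
    match PySem.Int.ofChars? (PySem.List.slice postal_code.toList none (some 2)) with
    | none => none  -- int() raises ValueError; excluded by Pre_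
    | some p =>
      if p < 1 ∨ 80 < p ∨ p = 74 then none
      else
        match bsearchB 28 p 0 27 with
        | none => none
        | some i => PySem.List.pyGet? namesB i   -- _NAMES[lo]

-- ===== PRECONDITION & SPEC =====
-- Pre_ excludes exactly the inputs where int(postal_code[:2]) raises ValueError (both A and B raise there).
def Pre_get_district_from_postal_py (postal_code : String) : Prop :=
  PySem.Str.len postal_code < 2 ∨
    (PySem.Int.ofChars? (PySem.List.slice postal_code.toList none (some 2))).isSome = true
instance (postal_code : String) : Decidable (Pre_get_district_from_postal_py postal_code) := by
  unfold Pre_get_district_from_postal_py; infer_instance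

def pvWitness_get_district_from_postal_py : String := "560123"

def Spec_get_district_from_postal_py (postal_code : String) (out : Option String) : Prop := out = get_district_from_postal_py_alt postal_code
instance (postal_code : String) (out : Option String) : Decidable (Spec_get_district_from_postal_py postal_code out) := by unfold Spec_get_district_from_postal_py; infer_instance

-- ===== CLAIM (what is proved, stated in full; the proofs are below) =====
def Claim_equal_get_district_from_postal_py : Prop := ∀ (postal_code : String), Dom_get_district_from_postal_py postal_code → Pre_get_district_from_postal_py postal_code → Spec_get_district_from_postal_py postal_code (get_district_from_postal_py postal_code)

-- ===== LEMMAS AND PROOFS =====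

-- A's scan finds nothing when the prefix lies outside [1, 80]
lemma findRange_none (p : Int) (hp : p < 1 ∨ 80 < p) (l : List ((Int × Int) × String))
    (hl : ∀ r ∈ l, 1 ≤ r.1.1 ∧ r.1.2 ≤ 80) :
    l.find? (fun r => decide (r.1.1 ≤ p ∧ p ≤ r.1.2)) = none := by
  induction l with
  | nil => rfl
  | cons r t ih =>
    have hr := hl r (by simp)
    rw [List.find?_cons_of_neg, ih (fun r hr => hl r (by simp [hr]))]
    simp only [decide_eq_true_eq, not_and]
    omega

set_option maxRecDepth 100000 in
-- the two post-parse computations agree on every prefix in [0, 80]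
lemma core_agree_small : ∀ n : Nat, n < 81 →
    (districtRangesA.find? (fun r => decide (r.1.1 ≤ (n : Int) ∧ (n : Int) ≤ r.1.2))).map (·.2)
      = (if (n : Int) < 1 ∨ 80 < (n : Int) ∨ (n : Int) = 74 then none
         else match bsearchB 28 (n : Int) 0 27 with
           | none => none
           | some i => PySem.List.pyGet? namesB i) := by decide

-- the two post-parse computations agree on every prefix
lemma core_agree (p : Int) :
    (districtRangesA.find? (fun r => decide (r.1.1 ≤ p ∧ p ≤ r.1.2))).map (·.2)
      = (if p < 1 ∨ 80 < p ∨ p = 74 then none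
         else match bsearchB 28 p 0 27 with
           | none => none
           | some i => PySem.List.pyGet? namesB i) := by
  by_cases hp : 1 ≤ p ∧ p ≤ 80
  · have hnat : p = ((p.toNat : Nat) : Int) := by omega
    rw [hnat]
    exact core_agree_small p.toNat (by omega)
  · have hp' : p < 1 ∨ 80 < p := by omega
    rw [findRange_none p hp' districtRangesA (by decide), if_pos (by omega)]
    rfl

-- ===== VERDICT (by name: the statement is the Claim_ definition above) =====
theorem get_district_from_postal_py_spec : Claim_equal_get_district_from_postal_py := by
  intro s _ hpre
  unfold Spec_get_district_from_postal_py get_district_from_postal_py get_district_from_postal_py_alt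
  by_cases hlen : PySem.Str.len s = 0 ∨ PySem.Str.len s < 2
  · rw [if_pos hlen, if_pos hlen]
  · rw [if_neg hlen, if_neg hlen]
    cases hof : PySem.Int.ofChars? (PySem.List.slice s.toList none (some 2)) with
    | none =>
      rcases hpre with h | h
      · exact absurd (Or.inr h) hlen
      · simp [hof] at h
    | some p => exact core_agree p
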